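-- pv_equiv track=rewrite | github.com/pypi-data/pypi-mirror-231 | packages/hak/hak-0.0.148.tar.gz/hak-0.0.148/hak/one/string/date/separator/get.py | f
-- ===== SOURCE A (Python) =====
-- from string import digits
--
-- def f(x):
--   d = {char: 0 for char in x if char not in digits}
--   for char in x:
--     if char not in digits:
--       d[char] += 1
--
--   for k in d:
--     if d[k] == 2:
--       return k
-- ===== SOURCE B (Python) =====
-- from string import digits
--
-- def f(x):
--   seen = set()
--   for char in x:
--     if char not in digits and char not in seen:
--       if x.count(char) == 2:
--         return char
--       seen.add(char)
-- ===== Notes on version B (the rewrite author's own statement) =====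
-- stated objective: simpler
-- what changed: Drops the frequency-dict build-then-scan two-phase algorithm: a single in-order pass over the string tests each not-yet-seen non-digit character directly with str.count and returns immediately on the first hit, so no dict is built and the string is usually not fully traversed.
import Mathlib
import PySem

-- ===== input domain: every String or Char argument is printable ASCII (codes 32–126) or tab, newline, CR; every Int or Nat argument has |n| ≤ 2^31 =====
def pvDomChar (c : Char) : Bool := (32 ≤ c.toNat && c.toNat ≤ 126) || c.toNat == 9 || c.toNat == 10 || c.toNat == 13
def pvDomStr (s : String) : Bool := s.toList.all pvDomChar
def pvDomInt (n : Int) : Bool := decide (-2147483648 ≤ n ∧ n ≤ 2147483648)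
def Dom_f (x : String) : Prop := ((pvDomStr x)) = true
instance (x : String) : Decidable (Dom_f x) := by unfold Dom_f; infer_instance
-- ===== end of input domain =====

-- B replaces A's two-phase frequency-dict-then-key-scan with a single in-order pass that
-- tests each new non-digit character directly via str.count (simpler; not faster).


-- ===== PORT A =====
-- string.digits; Python's `char in digits` for a single character is character membership (exact)
def pyDigits : List Char := "0123456789".toList

def f (x : String) : Option String :=
  -- d = {char: 0 for char in x if char not in digits}
  let d0 : PySem.Dict Char Int :=
    x.toList.foldl (fun d c => if pyDigits.contains c then d else d.insert c 0) PySem.Dict.empty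
  -- for char in x: if char not in digits: d[char] += 1
  let d : PySem.Dict Char Int :=
    x.toList.foldl (fun d c => if pyDigits.contains c then d else d.modify c 0 (· + 1)) d0
  -- for k in d: if d[k] == 2: return k
  (d.keys.find? (fun k => d.getD k 0 == 2)).map (fun k => String.ofList [k])

-- ===== PORT B =====
def fAltGo (x : String) (rest : List Char) (seen : PySem.Set Char) : Option String :=
  match rest with
  | [] => none
  | c :: rest =>
    if !pyDigits.contains c && !PySem.Set.contains seen c then
      if PySem.Str.count x (String.ofList [c]) == 2 then some (String.ofList [c])
      else fAltGo x rest (PySem.Set.add seen c)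
    else fAltGo x rest seen

def f_alt (x : String) : Option String := fAltGo x x.toList PySem.Set.empty

-- ===== PRECONDITION & SPEC =====
def Spec_f (x : String) (out : Option String) : Prop := out = f_alt x
instance (x : String) (out : Option String) : Decidable (Spec_f x out) := by unfold Spec_f; infer_instance

-- ===== CLAIM (what is proved, stated in full; the proofs are below) =====
def Claim_equal_f : Prop := ∀ (x : String), Dom_f x → Spec_f x (f x)

-- ===== LEMMAS AND PROOFS =====

-- Chars.count for a single-character needle is List.count
lemma countGo_single (c : Char) : ∀ (fuel : Nat) (l : List Char) (acc : Nat),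
    l.length ≤ fuel → PySem.Chars.count.go [c] fuel l acc = acc + l.count c := by
  intro fuel
  induction fuel with
  | zero => intro l acc h; cases l with
    | nil => simp [PySem.Chars.count.go]
    | cons a t => simp at h
  | succ n ih =>
    intro l acc h
    cases l with
    | nil => simp [PySem.Chars.count.go]
    | cons a t =>
      by_cases hac : a = c
      · subst hac
        have hpre : List.isPrefixOf [a] (a :: t) = true := by simp [List.isPrefixOf]
        simp only [PySem.Chars.count.go, hpre, if_true, List.length_cons, List.length_nil,
          List.drop_succ_cons, List.drop_zero]
        rw [ih t (acc + 1) (by simpa using h)]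
        simp
        omega
      · have hpre : List.isPrefixOf [c] (a :: t) = false := by
          simp [List.isPrefixOf]; exact fun hh => (hac hh.symm).elim
        simp only [PySem.Chars.count.go, hpre]
        rw [ih t acc (by simpa using Nat.le_of_succ_le_succ (by simpa using h))]
        simp [hac]

lemma count_single (l : List Char) (c : Char) : PySem.Chars.count l [c] = l.count c := by
  simp only [PySem.Chars.count, List.isEmpty_cons, Bool.false_eq_true, if_false]
  simpa using countGo_single c l.length l 0 le_rfl

-- find? only sees the predicate's values on the list's elements
lemma find?_congr_mem {α : Type} (l : List α) (p q : α → Bool)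
    (h : ∀ a ∈ l, p a = q a) : l.find? p = l.find? q := by
  induction l with
  | nil => rfl
  | cons a t ih =>
    have ha := h a (by simp)
    by_cases hp : p a
    · simp [List.find?, hp, ha ▸ hp]
    · simp only [List.find?, hp]
      rw [← ha]
      simp only [hp]
      exact ih fun a hm => h a (by simp [hm])

-- find? through filter
lemma find?_filter {α : Type} (l : List α) (p q : α → Bool) :
    (l.filter p).find? q = l.find? (fun a => p a && q a) := by
  induction l with
  | nil => rfl
  | cons c t ih => by_cases hp : p c <;> by_cases hq : q c <;> simp [List.find?, hp, hq, ih]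

-- Set.update only appends
lemma update_append {α : Type} [BEq α] [LawfulBEq α] :
    ∀ (m s : List α), ∃ t, PySem.Set.update s m = s ++ t := by
  intro m
  induction m with
  | nil => exact fun s => ⟨[], by simp [PySem.Set.update]⟩
  | cons c m ih =>
    intro s
    have hstep : PySem.Set.update s (c :: m) = PySem.Set.update (PySem.Set.add s c) m := rfl
    rw [hstep]
    by_cases hc : c ∈ s
    · rw [show PySem.Set.add s c = s from by simp [PySem.Set.add, hc]]
      exact ih s
    · rw [show PySem.Set.add s c = s ++ [c] from by simp [PySem.Set.add, hc]]
      obtain ⟨t, ht⟩ := ih (s ++ [c])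
      exact ⟨c :: t, by simpa using ht⟩

-- find? over Set.update s m when every element of s fails the predicate
lemma find?_update {α : Type} [BEq α] [LawfulBEq α] (q : α → Bool) :
    ∀ (m s : List α), (∀ a ∈ s, q a = false) →
      (PySem.Set.update s m).find? q = m.find? q := by
  intro m
  induction m with
  | nil =>
    intro s hs
    simp only [PySem.Set.update, List.foldl_nil, List.find?_nil]
    exact List.find?_eq_none.mpr fun a ha => by simp [hs a ha]
  | cons c m ih =>
    intro s hs
    have hstep : PySem.Set.update s (c :: m) = PySem.Set.update (PySem.Set.add s c) m := rfl
    rw [hstep]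
    by_cases hq : q c
    · simp only [List.find?, hq]
      by_cases hc : c ∈ s
      · exact absurd hq (by simp [hs c hc])
      · have hadd : PySem.Set.add s c = s ++ [c] := by simp [PySem.Set.add, hc]
        obtain ⟨t, ht⟩ := update_append m (PySem.Set.add s c)
        rw [ht, hadd, List.append_assoc, List.find?_append]
        have hnone : s.find? q = none := List.find?_eq_none.mpr fun a ha => by simp [hs a ha]
        simp [hnone, hq]
    · have hadd : ∀ a ∈ PySem.Set.add s c, q a = false := by
        intro a ha
        rcases (PySem.Set.mem_add s c a).mp ha with h | h
        · exact hs a h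
        · subst h; simpa using hq
      rw [ih (PySem.Set.add s c) hadd]
      simp [List.find?, hq]

-- abbreviation used in the proofs: the non-digit characters of x, in order
def nonDigits (x : String) : List Char := x.toList.filter (fun c => !pyDigits.contains c)

-- d0's lookups are all 0
lemma getD_foldl_insert_zero (k : Char) : ∀ (l : List Char) (d : PySem.Dict Char Int),
    d.getD k 0 = 0 → (l.foldl (fun d c => d.insert c (0 : Int)) d).getD k 0 = 0 := by
  intro l
  induction l with
  | nil => intro d h; simpa using h
  | cons c t ih =>
    intro d h
    simp only [List.foldl_cons]
    exact ih _ (by rw [PySem.Dict.getD_insert]; split <;> simp [h])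

-- Set.update is the identity when everything updated is already present
lemma update_of_subset {α : Type} [BEq α] [LawfulBEq α] :
    ∀ (l s : List α), (∀ a ∈ l, a ∈ s) → PySem.Set.update s l = s := by
  intro l
  induction l with
  | nil => intro s _; rfl
  | cons c t ih =>
    intro s h
    have hstep : PySem.Set.update s (c :: t) = PySem.Set.update (PySem.Set.add s c) t := rfl
    rw [hstep, show PySem.Set.add s c = s from by simp [PySem.Set.add, h c (by simp)]]
    exact ih s fun a ha => h a (by simp [ha])

-- the common normal form of both programs
lemma f_eq_find (x : String) :
    f x = ((nonDigits x).find? (fun c => (nonDigits x).count c == 2)).map (fun k => String.ofList [k]) := by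
  unfold f
  have e1 : (fun (d : PySem.Dict Char Int) c => if pyDigits.contains c then d else d.insert c 0)
      = (fun d c => if (!pyDigits.contains c) then d.insert c 0 else d) := by
    funext d c; by_cases h : c ∈ pyDigits <;> simp [h]
  have e2 : (fun (d : PySem.Dict Char Int) c => if pyDigits.contains c then d else d.modify c 0 (· + 1))
      = (fun d c => if (!pyDigits.contains c) then d.modify c 0 (· + 1) else d) := by
    funext d c; by_cases h : c ∈ pyDigits <;> simp [h]
  simp only [e1, e2, ← List.foldl_filter]
  rw [show List.filter (fun c => !pyDigits.contains c) x.toList = nonDigits x from rfl]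
  set nd := nonDigits x with hnd
  have hd0getD : ∀ k, ((nd.foldl (fun d c => d.insert c (0 : Int)) PySem.Dict.empty)).getD k 0 = 0 :=
    fun k => getD_foldl_insert_zero k nd _ (by simp)
  have hkeys : ((nd.foldl (fun d c => d.modify c 0 (· + 1))
      (nd.foldl (fun d c => d.insert c (0 : Int)) PySem.Dict.empty))).keys = PySem.Set.ofList nd := by
    rw [PySem.Dict.keys_foldl_modify, PySem.Dict.keys_foldl_insert]
    have : PySem.Set.update (PySem.Dict.empty : PySem.Dict Char Int).keys nd = PySem.Set.ofList nd := rfl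
    rw [this]
    exact update_of_subset nd _ fun a ha => by simpa [PySem.Set.mem_ofList] using ha
  have hgetD : ∀ k, ((nd.foldl (fun d c => d.modify c 0 (· + 1))
      (nd.foldl (fun d c => d.insert c (0 : Int)) PySem.Dict.empty))).getD k 0 = (nd.count k : Int) := by
    intro k
    rw [PySem.Dict.getD_foldl_modify_add_one, hd0getD]
    ring
  rw [hkeys]
  congr 1
  have hofl : PySem.Set.ofList nd = PySem.Set.update [] nd := rfl
  rw [hofl, find?_update _ nd [] (by simp)]
  exact find?_congr_mem nd _ _ fun a _ => by
    rw [hgetD a]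
    by_cases h : nd.count a = 2 <;> simp [h]
    omega

lemma f_alt_eq_find (x : String) :
    f_alt x = ((nonDigits x).find? (fun c => (nonDigits x).count c == 2)).map (fun k => String.ofList [k]) := by
  unfold f_alt
  have key : ∀ (rest : List Char) (seen : PySem.Set Char),
      (∀ a ∈ seen, (!pyDigits.contains a
          && (PySem.Str.count x (String.ofList [a]) == 2)) = false) →
      fAltGo x rest seen
        = (rest.find? (fun c => !pyDigits.contains c
            && (PySem.Str.count x (String.ofList [c]) == 2))).map (fun k => String.ofList [k]) := by
    intro rest
    induction rest with
    | nil => intro seen _; rfl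
    | cons c t ih =>
      intro seen hseen
      have hgo : fAltGo x (c :: t) seen
          = if !pyDigits.contains c && !PySem.Set.contains seen c then
              (if PySem.Str.count x (String.ofList [c]) == 2 then some (String.ofList [c])
               else fAltGo x t (PySem.Set.add seen c))
            else fAltGo x t seen := rfl
      rw [hgo]
      by_cases hdig : c ∈ pyDigits
      · rw [if_neg (by simp [hdig])]
        rw [ih seen hseen, List.find?_cons_of_neg (by simp [hdig])]
      · by_cases hmem : c ∈ seen
        · rw [if_neg (by simp [PySem.Set.contains, hmem])]
          rw [ih seen hseen,
            List.find?_cons_of_neg (by simp only [hseen c hmem]; exact Bool.false_ne_true)]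
        · by_cases hcnt : PySem.Chars.count x.toList [c] = 2
          · rw [if_pos (by simp [hdig, PySem.Set.contains, hmem]), if_pos (by simp [hcnt]),
              List.find?_cons_of_pos (by simp [hdig, hcnt])]
            rfl
          · rw [if_pos (by simp [hdig, PySem.Set.contains, hmem]), if_neg (by simp [hcnt])]
            rw [ih (PySem.Set.add seen c) ?_, List.find?_cons_of_neg (by simp [hcnt])]
            intro a ha
            rcases (PySem.Set.mem_add seen c a).mp ha with h | h
            · exact hseen a h
            · subst h; simp [hcnt]
  rw [key x.toList PySem.Set.empty (by simp [PySem.Set.empty])]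
  congr 1
  rw [show (fun c => !pyDigits.contains c && (PySem.Str.count x (String.ofList [c]) == 2))
      = (fun c => !pyDigits.contains c && (x.toList.count c == 2)) from by
    funext c
    rw [show PySem.Str.count x (String.ofList [c]) = x.toList.count c from by
      rw [PySem.Str.count_eq, String.toList_ofList, count_single]]]
  rw [show (nonDigits x).find? (fun c => (nonDigits x).count c == 2)
      = (x.toList.filter (fun c => !pyDigits.contains c)).find?
          (fun c => (nonDigits x).count c == 2) from rfl,
    find?_filter]
  exact find?_congr_mem _ _ _ fun a _ => by
    by_cases hd : a ∈ pyDigits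
    · simp [hd]
    · have hcc : (nonDigits x).count a = x.toList.count a :=
        List.count_filter (by simp [hd])
      simp [hd, hcc]

-- ===== VERDICT (by name: the statement is the Claim_ definition above) =====
theorem f_spec : Claim_equal_f := by
  intro x _
  unfold Spec_f
  rw [f_eq_find, f_alt_eq_find]
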